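-- pv_equiv track=rewrite | github.com/catr1xLiu/LoRA-MDM-Age-Dataset | visualize_markers_mesh.py | validate_skeleton_with_filtering
-- ===== SOURCE A (Python) =====
-- def validate_skeleton_with_filtering(marker_names, skeleton_definition):
--     """
--     Validate skeleton connections with filtered markers.
--
--     Args:
--         marker_names: Array of marker names (already filtered)
--         skeleton_definition: List of (parent_name, child_name) tuples
--
--     Returns:
--         Tuple of:
--         - valid_connections: List of (idx1, idx2) integer tuples
--         - missing_markers: Set of marker names not found in data
--     """
--     valid_connections = []
--     missing_markers = set()
--
--     # Convert marker_names to list of strings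
--     marker_names_list = [str(name) for name in marker_names]
--
--     for p1_name, p2_name in skeleton_definition:
--         # Find indices of these markers
--         idx1 = marker_names_list.index(p1_name) if p1_name in marker_names_list else -1
--         idx2 = marker_names_list.index(p2_name) if p2_name in marker_names_list else -1
--
--         if idx1 >= 0 and idx2 >= 0:
--             valid_connections.append((idx1, idx2))
--         else:
--             if idx1 < 0:
--                 missing_markers.add(p1_name)
--             if idx2 < 0:
--                 missing_markers.add(p2_name)
--
--     return valid_connections, missing_markers
-- ===== SOURCE B (Python) =====
-- def validate_skeleton_with_filtering(marker_names, skeleton_definition):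
--     """
--     Validate skeleton connections with filtered markers.
--
--     Same result as the original, by a different algorithm: build a sorted
--     table of the distinct marker names with their first-occurrence indices,
--     resolve every skeleton endpoint once by binary search over that table,
--     then derive valid_connections and missing_markers from the resolved
--     index pairs in two bulk passes.
--     """
--     names = [str(x) for x in marker_names]
--     keys = sorted(set(names))
--     vals = [names.index(k) for k in keys]
--
--     def find(n):
--         lo, hi = 0, len(keys)
--         while lo < hi:
--             mid = (lo + hi) // 2
--             if keys[mid] < n:
--                 lo = mid + 1
--             else:
--                 hi = mid
--         if lo < len(keys) and keys[lo] == n: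
--             return vals[lo]
--         return -1
--
--     pairs = [(find(p1), find(p2)) for p1, p2 in skeleton_definition]
--     valid_connections = [(i, j) for i, j in pairs if i >= 0 and j >= 0]
--     missing_markers = {n for (p1, p2), (i, j) in zip(skeleton_definition, pairs)
--                        for n, k in ((p1, i), (p2, j)) if k < 0}
--     return valid_connections, missing_markers
-- ===== Notes on version B (the rewrite author's own statement) =====
-- stated objective: alternative
-- what changed: Replaces A's interleaved loop that rescans marker_names with 'in'/.index for every skeleton pair by a sorted first-occurrence lookup table queried with hand-written binary search, with valid_connections and missing_markers then derived in two bulk passes over the resolved index pairs.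
import Mathlib
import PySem

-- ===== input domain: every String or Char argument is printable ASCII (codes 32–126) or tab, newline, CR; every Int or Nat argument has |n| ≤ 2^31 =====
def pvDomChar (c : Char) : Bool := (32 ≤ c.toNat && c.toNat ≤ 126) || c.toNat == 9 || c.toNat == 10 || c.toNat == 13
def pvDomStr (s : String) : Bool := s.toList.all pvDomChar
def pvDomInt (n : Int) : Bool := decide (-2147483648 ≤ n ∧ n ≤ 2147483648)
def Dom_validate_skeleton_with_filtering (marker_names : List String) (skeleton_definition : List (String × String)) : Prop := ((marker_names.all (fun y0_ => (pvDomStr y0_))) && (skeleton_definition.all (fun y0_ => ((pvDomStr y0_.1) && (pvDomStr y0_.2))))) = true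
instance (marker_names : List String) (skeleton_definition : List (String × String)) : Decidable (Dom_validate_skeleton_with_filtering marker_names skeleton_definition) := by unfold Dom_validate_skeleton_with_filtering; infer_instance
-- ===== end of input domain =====

-- B replaces A's interleaved loop (membership + .index rescans per pair) by a sorted table of the
-- distinct names with their first-occurrence indices, binary search per endpoint, and two bulk passes.

-- ===== PORT A =====
def validate_skeleton_with_filtering (marker_names : List String) (skeleton_definition : List (String × String)) : (List (Int × Int)) × List String :=
  -- marker_names_list = [str(name) for name in marker_names]; str is the identity on String
  let marker_names_list : List String := marker_names.map (fun name => name)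
  let st := skeleton_definition.foldl (fun (st : List (Int × Int) × PySem.Set String) pq =>
      let idx1 : Int := if pq.1 ∈ marker_names_list then (((PySem.List.index? marker_names_list pq.1).getD 0 : Nat) : Int) else -1
      let idx2 : Int := if pq.2 ∈ marker_names_list then (((PySem.List.index? marker_names_list pq.2).getD 0 : Nat) : Int) else -1
      if idx1 ≥ 0 ∧ idx2 ≥ 0 then
        (st.1 ++ [(idx1, idx2)], st.2)
      else
        let m1 := if idx1 < 0 then PySem.Set.add st.2 pq.1 else st.2
        let m2 := if idx2 < 0 then PySem.Set.add m1 pq.2 else m1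
        (st.1, m2))
    ([], PySem.Set.empty)
  st

-- ===== PORT B =====
-- the while-loop of Source B's nested 'find' (bisect_left written by hand); keys[mid] is ported with
-- getD — exact here because every call keeps mid < hi ≤ len(keys)
def pvBsearch (keys : List String) (n : String) (lo hi : Nat) : Nat :=
  if h : lo < hi then
    if keys.getD ((lo + hi) / 2) "" < n then pvBsearch keys n ((lo + hi) / 2 + 1) hi
    else pvBsearch keys n lo ((lo + hi) / 2)
  else lo
termination_by hi - lo
decreasing_by all_goals omega

-- Source B's nested 'find' (the closed-over keys/vals become parameters)
def pvFind (keys : List String) (vals : List Int) (n : String) : Int :=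
  let lo := pvBsearch keys n 0 keys.length
  if lo < keys.length ∧ keys.getD lo "" = n then vals.getD lo 0 else -1

def validate_skeleton_with_filtering_alt (marker_names : List String) (skeleton_definition : List (String × String)) : (List (Int × Int)) × List String :=
  -- names = [str(x) for x in marker_names]; str is the identity on String
  let names : List String := marker_names.map (fun x => x)
  -- keys = sorted(set(names)); vals = [names.index(k) for k in keys] (k ∈ names, so .index returns)
  let keys : List String := PySem.List.sorted (PySem.Set.ofList names) (fun x => x) false
  let vals : List Int := keys.map (fun k => (((PySem.List.index? names k).getD 0 : Nat) : Int))
  let pairs : List (Int × Int) := skeleton_definition.map (fun p => (pvFind keys vals p.1, pvFind keys vals p.2))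
  let valid_connections : List (Int × Int) := pairs.filter (fun ij => decide (ij.1 ≥ 0) && decide (ij.2 ≥ 0))
  let missing_markers : PySem.Set String := PySem.Set.ofList
    ((((skeleton_definition.zip pairs).flatMap (fun x => [(x.1.1, x.2.1), (x.1.2, x.2.2)])).filter
        (fun y => decide (y.2 < 0))).map Prod.fst)
  (valid_connections, missing_markers)

-- ===== PRECONDITION & SPEC =====
def Spec_validate_skeleton_with_filtering (marker_names : List String) (skeleton_definition : List (String × String)) (out : (List (Int × Int)) × List String) : Prop := out = validate_skeleton_with_filtering_alt marker_names skeleton_definition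
instance (marker_names : List String) (skeleton_definition : List (String × String)) (out : (List (Int × Int)) × List String) : Decidable (Spec_validate_skeleton_with_filtering marker_names skeleton_definition out) := by unfold Spec_validate_skeleton_with_filtering; infer_instance

-- ===== CLAIM (what is proved, stated in full; the proofs are below) =====
def Claim_equal_validate_skeleton_with_filtering : Prop := ∀ (marker_names : List String) (skeleton_definition : List (String × String)), Dom_validate_skeleton_with_filtering marker_names skeleton_definition → Spec_validate_skeleton_with_filtering marker_names skeleton_definition (validate_skeleton_with_filtering marker_names skeleton_definition)

-- ===== LEMMAS AND PROOFS =====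

-- A's loop body, named so the fold characterisation below can state it
def pvStepA (mn : List String) (st : List (Int × Int) × PySem.Set String) (pq : String × String) : List (Int × Int) × PySem.Set String :=
  let idx1 : Int := if pq.1 ∈ mn then (((PySem.List.index? mn pq.1).getD 0 : Nat) : Int) else -1
  let idx2 : Int := if pq.2 ∈ mn then (((PySem.List.index? mn pq.2).getD 0 : Nat) : Int) else -1
  if idx1 ≥ 0 ∧ idx2 ≥ 0 then
    (st.1 ++ [(idx1, idx2)], st.2)
  else
    let m1 := if idx1 < 0 then PySem.Set.add st.2 pq.1 else st.2
    let m2 := if idx2 < 0 then PySem.Set.add m1 pq.2 else m1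
    (st.1, m2)

lemma portA_eq (marker_names : List String) (skeleton_definition : List (String × String)) :
    validate_skeleton_with_filtering marker_names skeleton_definition
      = skeleton_definition.foldl (pvStepA (marker_names.map (fun name => name))) ([], PySem.Set.empty) := rfl

-- A's interleaved fold, characterised: connections are a filtered map, missing markers a
-- fold of Set.add over the flattened skeleton names that are absent from mn
lemma foldA_eq (mn : List String) (sk : List (String × String)) (c : List (Int × Int)) (m : PySem.Set String) :
    sk.foldl (pvStepA mn) (c, m)
    = (c ++ (sk.filter (fun p => decide (p.1 ∈ mn) && decide (p.2 ∈ mn))).map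
          (fun p => ((((PySem.List.index? mn p.1).getD 0 : Nat) : Int), (((PySem.List.index? mn p.2).getD 0 : Nat) : Int))),
       ((sk.flatMap (fun pair => [pair.1, pair.2])).filter (fun n => !decide (n ∈ mn))).foldl PySem.Set.add m) := by
  induction sk generalizing c m with
  | nil => simp
  | cons p rest ih =>
    rw [List.foldl_cons]
    by_cases h1 : p.1 ∈ mn <;> by_cases h2 : p.2 ∈ mn
    · have hs : pvStepA mn (c, m) p
          = (c ++ [((((PySem.List.index? mn p.1).getD 0 : Nat) : Int), (((PySem.List.index? mn p.2).getD 0 : Nat) : Int))], m) := by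
        simp [pvStepA, h1, h2]
      rw [hs, ih]
      simp [h1, h2]
    · have hs : pvStepA mn (c, m) p = (c, PySem.Set.add m p.2) := by
        simp [pvStepA, h1, h2]
        rw [if_neg (by omega)]
      rw [hs, ih]
      simp [h1, h2, List.foldl_cons]
    · have hs : pvStepA mn (c, m) p = (c, PySem.Set.add m p.1) := by
        simp [pvStepA, h1, h2]
      rw [hs, ih]
      simp [h1, h2, List.foldl_cons]
    · have hs : pvStepA mn (c, m) p = (c, PySem.Set.add (PySem.Set.add m p.1) p.2) := by
        simp [pvStepA, h1, h2]
      rw [hs, ih]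
      simp [h1, h2, List.foldl_cons]

-- the hand-written bisect loop brackets the insertion point of n in a ≤-sorted keys
lemma pvBsearch_bracket (keys : List String) (n : String) (hs : keys.Pairwise (· ≤ ·)) :
    ∀ d lo hi, hi - lo = d → hi ≤ keys.length → lo ≤ hi →
      lo ≤ pvBsearch keys n lo hi ∧ pvBsearch keys n lo hi ≤ hi ∧
      (∀ j (hj : j < keys.length), lo ≤ j → j < pvBsearch keys n lo hi → keys[j] < n) ∧
      (∀ j (hj : j < keys.length), pvBsearch keys n lo hi ≤ j → j < hi → ¬ keys[j] < n) := by
  have mono : ∀ i j (hi : i < keys.length) (hj : j < keys.length), i ≤ j → keys[i] ≤ keys[j] := by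
    intro i j hi hj hij
    rcases Nat.lt_or_ge i j with h | h
    · exact (List.pairwise_iff_getElem.mp hs) i j hi hj h
    · have : i = j := le_antisymm hij h
      subst this; exact le_refl _
  intro d
  induction d using Nat.strong_induction_on with
  | _ d ih =>
    intro lo hi hd hhi hlo
    rw [pvBsearch]
    by_cases h : lo < hi
    · simp only [h, dif_pos]
      have hmid : (lo + hi) / 2 < keys.length := by omega
      have hget : keys.getD ((lo + hi) / 2) "" = keys[(lo + hi) / 2] := List.getD_eq_getElem keys "" hmid
      by_cases hc : keys.getD ((lo + hi) / 2) "" < n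
      · simp only [hc, if_pos]
        have hrec := ih (hi - ((lo + hi) / 2 + 1)) (by omega) ((lo + hi) / 2 + 1) hi rfl hhi (by omega)
        obtain ⟨r1, r2, r3, r4⟩ := hrec
        refine ⟨by omega, r2, ?_, r4⟩
        intro j hj hlj hjr
        by_cases hjm : j < (lo + hi) / 2 + 1
        · calc keys[j] ≤ keys[(lo + hi) / 2] := mono j _ hj hmid (by omega)
            _ < n := by rw [← hget]; exact hc
        · exact r3 j hj (by omega) hjr
      · simp only [hc, ite_false]
        have hrec := ih ((lo + hi) / 2 - lo) (by omega) lo ((lo + hi) / 2) rfl (by omega) (by omega)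
        obtain ⟨r1, r2, r3, r4⟩ := hrec
        refine ⟨r1, by omega, ?_, ?_⟩
        · intro j hj hlj hjr; exact r3 j hj hlj hjr
        · intro j hj hrj hjhi
          by_cases hjm : j < (lo + hi) / 2
          · exact r4 j hj hrj hjm
          · intro habs
            apply hc
            rw [hget]
            exact lt_of_le_of_lt (mono _ j hmid hj (by omega)) habs
    · rw [dif_neg h]
      exact ⟨le_refl _, by omega, fun j hj hlj hjr => absurd (lt_of_le_of_lt hlj hjr) (by omega),
             fun j hj hrj hjhi => absurd (lt_of_le_of_lt hrj hjhi) h⟩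

-- Source B's find, characterised: first-occurrence index of n in names, or -1
lemma pvFind_eq (names : List String) (n : String) :
    pvFind (PySem.List.sorted (PySem.Set.ofList names) (fun x => x) false)
        ((PySem.List.sorted (PySem.Set.ofList names) (fun x => x) false).map
          (fun k => (((PySem.List.index? names k).getD 0 : Nat) : Int)))
        n
      = if n ∈ names then (((PySem.List.index? names n).getD 0 : Nat) : Int) else -1 := by
  set keys := PySem.List.sorted (PySem.Set.ofList names) (fun x => x) false with hkeys
  have hlt : keys.Pairwise (· < ·) := PySem.List.sorted_ofList_pairwise_lt names
  have hle : keys.Pairwise (· ≤ ·) := hlt.imp le_of_lt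
  have hmem : ∀ x, x ∈ keys ↔ x ∈ names := by
    intro x
    rw [hkeys, PySem.List.mem_sorted, PySem.Set.mem_ofList]
  have hb := pvBsearch_bracket keys n hle (keys.length - 0) 0 keys.length rfl (le_refl _) (Nat.zero_le _)
  obtain ⟨-, hr2, hr3, hr4⟩ := hb
  set r := pvBsearch keys n 0 keys.length with hrdef
  unfold pvFind
  rw [← hrdef]
  by_cases hn : n ∈ names
  · -- n occurs in keys at some position p; the bracket pins r to it
    obtain ⟨p, hp, hkp⟩ := List.getElem_of_mem ((hmem n).mpr hn)
    have hrp : r ≤ p := by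
      by_contra hc
      exact absurd (hkp ▸ hr3 p hp (Nat.zero_le _) (by omega)) (lt_irrefl n)
    have hrlen : r < keys.length := lt_of_le_of_lt hrp hp
    have hkr : keys[r] = n := by
      have h1 : ¬ keys[r] < n := hr4 r hrlen (le_refl _) hrlen
      have h2 : keys[r] ≤ keys[p] := by
        rcases Nat.lt_or_ge r p with h | h
        · exact le_of_lt ((List.pairwise_iff_getElem.mp hlt) r p hrlen hp h)
        · have : r = p := le_antisymm hrp h
          subst this; exact le_refl _
      rw [hkp] at h2
      exact le_antisymm h2 (not_lt.mp h1)
    rw [if_pos ⟨hrlen, by rw [List.getD_eq_getElem keys "" hrlen, hkr]⟩, if_pos hn]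
    rw [List.getD_eq_getElem _ 0 (by simpa using hrlen)]
    simp [hkr]
  · rw [if_neg, if_neg hn]
    rintro ⟨hrlen, hkr⟩
    rw [List.getD_eq_getElem keys "" hrlen] at hkr
    exact hn ((hmem n).mp (hkr ▸ List.getElem_mem hrlen))

-- B's filtered map of resolved pairs = A's map over the pairs with both endpoints present
lemma conn_eq (mn : List String) (f : String → Int)
    (hf : ∀ x, f x = if x ∈ mn then (((PySem.List.index? mn x).getD 0 : Nat) : Int) else -1) :
    ∀ sk : List (String × String),
      (sk.map (fun p => (f p.1, f p.2))).filter (fun ij => decide (ij.1 ≥ 0) && decide (ij.2 ≥ 0))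
        = (sk.filter (fun p => decide (p.1 ∈ mn) && decide (p.2 ∈ mn))).map
            (fun p => ((((PySem.List.index? mn p.1).getD 0 : Nat) : Int), (((PySem.List.index? mn p.2).getD 0 : Nat) : Int))) := by
  intro sk
  induction sk with
  | nil => rfl
  | cons p rest ih =>
    simp only [List.map_cons, List.filter_cons]
    rw [hf p.1, hf p.2]
    by_cases h1 : p.1 ∈ mn <;> by_cases h2 : p.2 ∈ mn <;>
      simp [h1, h2, ih]

-- B's missing-name extraction from the zipped resolved pairs = A's absent flattened names
lemma missing_eq (mn : List String) (f : String → Int)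
    (hf : ∀ x, f x = if x ∈ mn then (((PySem.List.index? mn x).getD 0 : Nat) : Int) else -1) :
    ∀ sk : List (String × String),
      (((sk.zip (sk.map (fun p => (f p.1, f p.2)))).flatMap (fun x => [(x.1.1, x.2.1), (x.1.2, x.2.2)])).filter
          (fun y => decide (y.2 < 0))).map Prod.fst
        = (sk.flatMap (fun pair => [pair.1, pair.2])).filter (fun n => !decide (n ∈ mn)) := by
  intro sk
  induction sk with
  | nil => rfl
  | cons p rest ih =>
    simp only [List.map_cons, List.zip_cons_cons, List.flatMap_cons, List.filter_append, List.map_append, ih]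
    congr 1
    by_cases h1 : p.1 ∈ mn <;> by_cases h2 : p.2 ∈ mn <;>
      simp [hf, h1, h2]

-- ===== VERDICT (by name: the statement is the Claim_ definition above) =====
theorem validate_skeleton_with_filtering_spec : Claim_equal_validate_skeleton_with_filtering := by
  intro mn sk _
  unfold Spec_validate_skeleton_with_filtering
  rw [portA_eq]
  simp only [List.map_id']
  rw [foldA_eq]
  unfold validate_skeleton_with_filtering_alt
  simp only [List.map_id']
  have hf : ∀ x, pvFind (PySem.List.sorted (PySem.Set.ofList mn) (fun x => x) false)
      ((PySem.List.sorted (PySem.Set.ofList mn) (fun x => x) false).map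
        (fun k => (((PySem.List.index? mn k).getD 0 : Nat) : Int))) x
      = if x ∈ mn then (((PySem.List.index? mn x).getD 0 : Nat) : Int) else -1 := fun x => pvFind_eq mn x
  refine Prod.ext ?_ ?_
  · simpa using (conn_eq mn _ hf sk).symm
  · show (_ : List String) = _
    rw [missing_eq mn _ hf sk, PySem.Set.ofList_eq_foldl]
    rfl
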